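-- pv_equiv track=rewrite | github.com/GiuliaGhisolfi/ProteinSynthesis | src/process/transcription.py | find_promoters_positions
-- ===== SOURCE A (Python) =====
-- MIN_LENGTH_PROMOTER = 200 # minimum length between promoters
--
-- def find_promoters_positions(dna_sequence, promoters_list):
--     """
--     Find the positions of the promoters in a DNA sequence.
--     """
--     # find promoter sequences in the DNA sequence
--     promoter_positions_list = sorted([i for promoter in promoters_list for i, _ in
--         enumerate(dna_sequence) if dna_sequence[i:].startswith(promoter)])
--
--     # if dist between promoters is less than 100, consider it as a single promoter
--     i = 0
--     while i < len(promoter_positions_list)-1: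
--         if promoter_positions_list[i+1] - promoter_positions_list[i] < MIN_LENGTH_PROMOTER:
--             del promoter_positions_list[i+1]
--         else: i += 1
--
--     return promoter_positions_list
-- ===== SOURCE B (Python) =====
-- MIN_LENGTH_PROMOTER = 200 # minimum length between promoters
--
-- def find_promoters_positions(dna_sequence, promoters_list):
--     """
--     Find the positions of the promoters in a DNA sequence.
--     """
--     positions = []
--     for i in range(len(dna_sequence)):
--         if any(dna_sequence.startswith(promoter, i) for promoter in promoters_list):
--             if not positions or i - positions[-1] >= MIN_LENGTH_PROMOTER:
--                 positions.append(i)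
--     return positions
-- ===== Notes on version B (the rewrite author's own statement) =====
-- stated objective: faster
-- what changed: B replaces A's promoter-major comprehension (which copies dna_sequence[i:] at every index), sort, and quadratic del-in-loop merge with one position-major pass using startswith(promoter, i) and the greedy >=200 merge fused into the same pass.
import Mathlib
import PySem

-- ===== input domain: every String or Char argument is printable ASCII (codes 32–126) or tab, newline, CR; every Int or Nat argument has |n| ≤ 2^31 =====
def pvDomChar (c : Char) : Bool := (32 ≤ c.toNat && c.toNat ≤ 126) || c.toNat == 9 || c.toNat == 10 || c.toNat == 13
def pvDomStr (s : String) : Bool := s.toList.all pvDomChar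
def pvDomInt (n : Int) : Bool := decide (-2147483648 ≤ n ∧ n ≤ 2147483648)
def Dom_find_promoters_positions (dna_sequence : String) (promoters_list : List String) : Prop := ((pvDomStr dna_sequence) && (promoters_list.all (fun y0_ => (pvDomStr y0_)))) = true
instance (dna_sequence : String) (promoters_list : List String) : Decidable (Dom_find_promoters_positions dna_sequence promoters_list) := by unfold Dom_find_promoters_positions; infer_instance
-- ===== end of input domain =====

-- B replaces A's promoter-major scan + sort + quadratic del-in-loop merge with a single
-- position-major pass (startswith(p, i), no slice copies, no sort) with the greedy merge fused in.

-- ===== PORT A =====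
-- the 'while i < len(l)-1: if l[i+1]-l[i] < 200: del l[i+1] else: i += 1' loop of A.
-- fuel is a totality guard only: each iteration either shortens l or advances i, so
-- fuel = l.length iterations always suffice (proved in pvMergeLoopA_eq below).
def pvMergeLoopA : Nat → List Int → Nat → List Int
  | 0, l, _ => l
  | fuel + 1, l, i =>
    if h : i + 1 < l.length then
      if l[i+1]'h - l[i]'(by omega) < 200 then pvMergeLoopA fuel (l.eraseIdx (i+1)) i
      else pvMergeLoopA fuel l (i+1)
    else l

def find_promoters_positions (dna_sequence : String) (promoters_list : List String) : List Int :=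
  -- sorted([i for promoter in promoters_list for i, _ in enumerate(dna_sequence)
  --         if dna_sequence[i:].startswith(promoter)])
  let promoter_positions_list :=
    PySem.List.sorted
      (promoters_list.flatMap (fun promoter =>
        ((PySem.List.enumerate dna_sequence.toList 0).filter (fun q =>
          PySem.Chars.startswith (PySem.List.slice dna_sequence.toList (some q.1) none) promoter.toList)).map (·.1)))
      (fun x => x) false
  pvMergeLoopA promoter_positions_list.length promoter_positions_list 0

-- ===== PORT B =====
def find_promoters_positions_alt (dna_sequence : String) (promoters_list : List String) : List Int :=
  -- for i in range(len(dna)): if any(dna.startswith(p, i) …): greedy-append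
  -- dna.startswith(p, i) for 0 ≤ i ≤ len(dna) is exactly: p is a prefix of dna[i:] (hand-ported as a prefix
  -- test on the dropped character list; i ≥ 0 here since it comes from range(len(dna)))
  (PySem.List.pyRange 0 (PySem.Str.len dna_sequence) 1).foldl (fun positions i =>
    if promoters_list.any (fun promoter =>
        PySem.Chars.startswith (dna_sequence.toList.drop i.toNat) promoter.toList) then
      if positions.isEmpty || decide (200 ≤ i - positions.getLastD 0) then positions ++ [i]
      else positions
    else positions) []

-- ===== PRECONDITION & SPEC =====
def Spec_find_promoters_positions (dna_sequence : String) (promoters_list : List String) (out : List Int) : Prop := out = find_promoters_positions_alt dna_sequence promoters_list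
instance (dna_sequence : String) (promoters_list : List String) (out : List Int) : Decidable (Spec_find_promoters_positions dna_sequence promoters_list out) := by unfold Spec_find_promoters_positions; infer_instance

-- ===== CLAIM (what is proved, stated in full; the proofs are below) =====
def Claim_equal_find_promoters_positions : Prop := ∀ (dna_sequence : String) (promoters_list : List String), Dom_find_promoters_positions dna_sequence promoters_list → Spec_find_promoters_positions dna_sequence promoters_list (find_promoters_positions dna_sequence promoters_list)

-- ===== LEMMAS AND PROOFS =====
-- greedy merge, after a kept element `last`
def pvMerge1 (last : Int) : List Int → List Int
  | [] => []
  | x :: xs => if x - last < 200 then pvMerge1 last xs else x :: pvMerge1 x xs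

-- the merged list of a whole (sorted) list
def pvListMerge : List Int → List Int
  | [] => []
  | a :: t => a :: pvMerge1 a t

lemma pvMerge1_cons_cons (t x : Int) (xs : List Int) :
    pvMerge1 t (x :: x :: xs) = pvMerge1 t (x :: xs) := by
  by_cases h : x - t < 200
  · simp [pvMerge1, h]
  · simp [pvMerge1, h, sub_self]

lemma pvListMerge_eq_merge1_head (a : Int) (t : List Int) :
    pvListMerge (a :: t) = a :: pvMerge1 a (a :: t) := by
  simp [pvListMerge, pvMerge1, sub_self]

-- A's destructive while-loop computes pvMerge1 on the suffix after the kept prefix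
lemma pvMergeLoopA_eq (rest : List Int) : ∀ (fuel : Nat), rest.length ≤ fuel →
    ∀ (kept : List Int) (last : Int),
    pvMergeLoopA fuel (kept ++ last :: rest) kept.length = kept ++ last :: pvMerge1 last rest := by
  induction rest with
  | nil =>
    intro fuel _ kept last
    cases fuel with
    | zero => simp [pvMergeLoopA, pvMerge1]
    | succ f =>
      rw [pvMergeLoopA]
      rw [dif_neg (by simp)]
      simp [pvMerge1]
  | cons x rs ih =>
    intro fuel hf kept last
    cases fuel with
    | zero => simp at hf
    | succ f =>
      rw [pvMergeLoopA]
      have hlen : (kept ++ last :: x :: rs).length = kept.length + 2 + rs.length := by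
        simp; omega
      have h1 : kept.length + 1 < (kept ++ last :: x :: rs).length := by omega
      rw [dif_pos h1]
      have e1 : (kept ++ last :: x :: rs)[kept.length + 1]'h1 = x := by
        rw [List.getElem_append_right (by omega)]
        simp
      have e0 : (kept ++ last :: x :: rs)[kept.length]'(by omega) = last := by
        rw [List.getElem_append_right (by omega)]
        simp
      rw [e1, e0]
      have hf' : rs.length ≤ f := by simp at hf; omega
      by_cases h : x - last < 200
      · rw [if_pos h]
        have he : (kept ++ last :: x :: rs).eraseIdx (kept.length + 1) = kept ++ last :: rs := by
          rw [List.eraseIdx_append_of_length_le (by omega) _]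
          simp
        rw [he, ih f hf' kept last]
        simp [pvMerge1, h]
      · rw [if_neg h]
        have he : kept ++ last :: x :: rs = (kept ++ [last]) ++ x :: rs := by simp
        have hl : kept.length + 1 = (kept ++ [last]).length := by simp
        rw [he, hl, ih f hf' (kept ++ [last]) x]
        simp [pvMerge1, h]

lemma pvMergeLoopA_all (l : List Int) : pvMergeLoopA l.length l 0 = pvListMerge l := by
  cases l with
  | nil => simp [pvMergeLoopA, pvListMerge]
  | cons a t =>
    have := pvMergeLoopA_eq t (a :: t).length (by simp) [] a
    simpa [pvListMerge] using this

-- B's fold computes pvMerge1 as well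
lemma pvFoldB_eq (xs : List Int) : ∀ (acc : List Int) (last : Int),
    xs.foldl (fun positions i =>
      if positions.isEmpty || decide (200 ≤ i - positions.getLastD 0) then positions ++ [i]
      else positions) (acc ++ [last]) = acc ++ last :: pvMerge1 last xs := by
  induction xs with
  | nil => intro acc last; simp [pvMerge1]
  | cons x rs ih =>
    intro acc last
    rw [List.foldl_cons]
    by_cases h : 200 ≤ x - last
    · have hc : ((acc ++ [last]).isEmpty || decide (200 ≤ x - (acc ++ [last]).getLastD 0)) = true := by
        simp [h]
      rw [hc]
      simp only [if_true]
      have he : acc ++ [last] ++ [x] = (acc ++ [last]) ++ [x] := rfl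
      rw [he, ih (acc ++ [last]) x]
      have hn : ¬ (x - last < 200) := by omega
      simp [pvMerge1, hn]
    · have hc : ((acc ++ [last]).isEmpty || decide (200 ≤ x - (acc ++ [last]).getLastD 0)) = false := by
        simp; omega
      rw [hc]
      simp only [Bool.false_eq_true, if_false]
      rw [ih acc last]
      have hl : x - last < 200 := by omega
      simp [pvMerge1, hl]

lemma pvFoldB_all (xs : List Int) :
    xs.foldl (fun positions i =>
      if positions.isEmpty || decide (200 ≤ i - positions.getLastD 0) then positions ++ [i]
      else positions) [] = pvListMerge xs := by
  cases xs with
  | nil => simp [pvListMerge]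
  | cons x rs =>
    rw [List.foldl_cons]
    have hc : (([] : List Int).isEmpty || decide (200 ≤ x - ([] : List Int).getLastD 0)) = true := by simp
    rw [hc]
    simp only [if_true, List.nil_append]
    have he : [x] = ([] : List Int) ++ [x] := rfl
    rw [he, pvFoldB_eq rs [] x]
    simp [pvListMerge]

-- greedy merge of a ≤-sorted list depends only on the set of its elements
theorem pvMerge1_eq_of_mem (A B : List Int) (hA : A.Pairwise (· ≤ ·)) (hB : B.Pairwise (· < ·))
    (hm : ∀ x : Int, x ∈ A ↔ x ∈ B) (t : Int) : pvMerge1 t A = pvMerge1 t B := by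
  cases A with
  | nil =>
    have hBnil : B = [] := by
      cases B with
      | nil => rfl
      | cons b u => exact absurd ((hm b).mpr (List.mem_cons_self)) (List.not_mem_nil)
    subst hBnil; rfl
  | cons a A' =>
    rw [List.pairwise_cons] at hA
    by_cases hmem : a ∈ A'
    · -- duplicated head: the second copy of a must be A''s head; drop it
      cases A' with
      | nil => exact absurd hmem (List.not_mem_nil)
      | cons a2 A'' =>
        have h2 : a2 = a := by
          have hle : a ≤ a2 := hA.1 a2 List.mem_cons_self
          rcases List.mem_cons.mp hmem with h | h
          · omega
          · have := (List.pairwise_cons.mp hA.2).1 a h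
            omega
        subst h2
        rw [pvMerge1_cons_cons]
        exact pvMerge1_eq_of_mem (a2 :: A'') B
          (List.pairwise_cons.mpr ⟨fun x hx => hA.1 x (List.mem_cons_of_mem _ hx), (List.pairwise_cons.mp hA.2).2⟩)
          hB (fun x => by
            constructor
            · intro hx; exact (hm x).mp (List.mem_cons_of_mem _ hx)
            · intro hx
              rcases List.mem_cons.mp ((hm x).mpr hx) with h | h
              · subst h; exact hmem
              · exact h) t
    · -- a occurs once; B's head must be a as well
      have hBne : B ≠ [] := by
        intro h
        have hx := (hm a).mp List.mem_cons_self
        rw [h] at hx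
        exact List.not_mem_nil hx
      cases B with
      | nil => exact absurd rfl hBne
      | cons b B' =>
        rw [List.pairwise_cons] at hB
        have hab : a = b := by
          have h1 : b ≤ a := by
            rcases List.mem_cons.mp ((hm a).mp List.mem_cons_self) with h | h
            · omega
            · have := hB.1 a h; omega
          have h2 : a ≤ b := by
            rcases List.mem_cons.mp ((hm b).mpr List.mem_cons_self) with h | h
            · omega
            · have := hA.1 b h; omega
          omega
        subst hab
        have hm' : ∀ x : Int, x ∈ A' ↔ x ∈ B' := by
          intro x
          constructor
          · intro hx
            rcases List.mem_cons.mp ((hm x).mp (List.mem_cons_of_mem _ hx)) with h | h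
            · subst h; exact absurd hx hmem
            · exact h
          · intro hx
            rcases List.mem_cons.mp ((hm x).mpr (List.mem_cons_of_mem _ hx)) with h | h
            · subst h
              have := hB.1 x hx
              omega
            · exact h
        simp only [pvMerge1]
        by_cases h : a - t < 200
        · rw [if_pos h, if_pos h]
          exact pvMerge1_eq_of_mem A' B' hA.2 hB.2 hm' t
        · rw [if_neg h, if_neg h]
          rw [pvMerge1_eq_of_mem A' B' hA.2 hB.2 hm' a]
termination_by A.length

lemma pvListMerge_eq_of_mem (A B : List Int) (hA : A.Pairwise (· ≤ ·)) (hB : B.Pairwise (· < ·))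
    (hm : ∀ x : Int, x ∈ A ↔ x ∈ B) : pvListMerge A = pvListMerge B := by
  cases A with
  | nil =>
    cases B with
    | nil => rfl
    | cons b u => exact absurd ((hm b).mpr List.mem_cons_self) (List.not_mem_nil)
  | cons a A' =>
    cases B with
    | nil => exact absurd ((hm a).mp List.mem_cons_self) (List.not_mem_nil)
    | cons b B' =>
      have hab : a = b := by
        have h1 : b ≤ a := by
          rcases List.mem_cons.mp ((hm a).mp List.mem_cons_self) with h | h
          · omega
          · have := (List.pairwise_cons.mp hB).1 a h; omega
        have h2 : a ≤ b := by
          rcases List.mem_cons.mp ((hm b).mpr List.mem_cons_self) with h | h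
          · omega
          · have := (List.pairwise_cons.mp hA).1 b h; omega
        omega
      subst hab
      rw [pvListMerge_eq_merge1_head, pvListMerge_eq_merge1_head]
      rw [pvMerge1_eq_of_mem (a :: A') (a :: B') hA hB hm a]

-- the two match-position lists have the same members
lemma pv_members (dna_sequence : String) (promoters_list : List String) (x : Int) :
    (x ∈ PySem.List.sorted
        (promoters_list.flatMap (fun promoter =>
          ((PySem.List.enumerate dna_sequence.toList 0).filter (fun q =>
            PySem.Chars.startswith (PySem.List.slice dna_sequence.toList (some q.1) none) promoter.toList)).map (·.1)))
        (fun x => x) false)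
    ↔ x ∈ (PySem.List.pyRange 0 (PySem.Str.len dna_sequence) 1).filter (fun i =>
        promoters_list.any (fun promoter =>
          PySem.Chars.startswith (dna_sequence.toList.drop i.toNat) promoter.toList)) := by
  rw [PySem.List.mem_sorted, List.mem_flatMap]
  rw [List.mem_filter, PySem.List.mem_pyRange_one]
  constructor
  · rintro ⟨p, hp, hx⟩
    rw [List.mem_map] at hx
    obtain ⟨q, hq, rfl⟩ := hx
    rw [List.mem_filter] at hq
    obtain ⟨hq1, hq2⟩ := hq
    rw [PySem.List.mem_enumerate_iff] at hq1
    obtain ⟨k, hk, rfl⟩ := hq1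
    simp only [zero_add]
    refine ⟨⟨by positivity, by simp only [PySem.Str.len_eq]; exact_mod_cast hk⟩, ?_⟩
    rw [List.any_eq_true]
    refine ⟨p, hp, ?_⟩
    simp only [zero_add] at hq2
    rw [PySem.List.slice_from_natCast] at hq2
    simpa using hq2
  · rintro ⟨⟨h0, hn⟩, hc⟩
    rw [List.any_eq_true] at hc
    obtain ⟨p, hp, hps⟩ := hc
    refine ⟨p, hp, ?_⟩
    rw [List.mem_map]
    refine ⟨(x, dna_sequence.toList[x.toNat]'(by simp only [PySem.Str.len_eq] at hn; omega)), ?_, rfl⟩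
    rw [List.mem_filter]
    constructor
    · rw [PySem.List.mem_enumerate_iff]
      refine ⟨x.toNat, by simp only [PySem.Str.len_eq] at hn; omega, ?_⟩
      simp [h0]
    · show PySem.Chars.startswith (PySem.List.slice dna_sequence.toList (some x) none) p.toList = true
      rw [show (x : Int) = ((x.toNat : Nat) : Int) by omega, PySem.List.slice_from_natCast]
      simpa using hps

lemma pv_pairwise_A (dna_sequence : String) (promoters_list : List String) :
    (PySem.List.sorted
        (promoters_list.flatMap (fun promoter =>
          ((PySem.List.enumerate dna_sequence.toList 0).filter (fun q =>
            PySem.Chars.startswith (PySem.List.slice dna_sequence.toList (some q.1) none) promoter.toList)).map (·.1)))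
        (fun x => x) false).Pairwise (· ≤ ·) :=
  PySem.List.sorted_pairwise _ _

lemma pv_pairwise_B (dna_sequence : String) (promoters_list : List String) :
    ((PySem.List.pyRange 0 (PySem.Str.len dna_sequence) 1).filter (fun i =>
        promoters_list.any (fun promoter =>
          PySem.Chars.startswith (dna_sequence.toList.drop i.toNat) promoter.toList))).Pairwise (· < ·) :=
  (PySem.List.pairwise_lt_pyRange_one 0 (PySem.Str.len dna_sequence)).filter _

-- ===== VERDICT (by name: the statement is the Claim_ definition above) =====
theorem find_promoters_positions_spec : Claim_equal_find_promoters_positions := by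
  intro dna_sequence promoters_list _
  unfold Spec_find_promoters_positions find_promoters_positions find_promoters_positions_alt
  rw [PySem.List.foldl_if_eq_foldl_filter]
  rw [pvMergeLoopA_all, pvFoldB_all]
  exact pvListMerge_eq_of_mem _ _ (pv_pairwise_A _ _) (pv_pairwise_B _ _) (pv_members _ _)
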